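-- pv_equiv track=rewrite | github.com/bonyubking/BaekJoon_2025_Bon | BaekJoon2024/1487.py | findanswer3
-- ===== SOURCE A (Python) =====
-- def findanswer3(anslist):
--     copylist = []
--     ans2list = []
--     keynumlist = []
--     for i in range(0, len(anslist)):
--         copylist = anslist[:]
--         keynum = copylist[i][0]
--         money = 0
--
--         for j in range(i, len(anslist)):
--             if copylist[j][1] < keynum:
--                 money = money + keynum - copylist[j][1]
--                 keynumlist.append(keynum)
--                 ans2list.append(money)
--
--
--     return ans2list, keynumlist
-- ===== SOURCE B (Python) =====
-- def findanswer3(anslist):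
--     # Transposed traversal: instead of re-scanning the suffix for every start
--     # index i, scan the data ONCE by element j and distribute each element into
--     # the per-start buckets i <= j it qualifies for; a second pass turns each
--     # bucket into its prefix sums and its repeated key.
--     n = len(anslist)
--     keys = [row[0] for row in anslist]
--     vals = [row[1] for row in anslist]
--     buckets = [[] for _ in range(n)]
--     for j in range(n):
--         v = vals[j]
--         for i in range(j + 1):
--             if v < keys[i]:
--                 buckets[i].append(keys[i] - v)
--     ans2list = []
--     keynumlist = []
--     for i in range(n):
--         t = 0
--         for d in buckets[i]:
--             t = t + d
--             ans2list.append(t)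
--             keynumlist.append(keys[i])
--     return ans2list, keynumlist
-- ===== Notes on version B (the rewrite author's own statement) =====
-- stated objective: alternative
-- what changed: The nested loops are transposed and staged through a new data structure: B scans the elements once (outer loop over j, inner over start indices i <= j) distributing each qualifying difference into a per-start-index bucket list, then a second pass converts each bucket into running sums and a repeated key; A instead re-scans the whole suffix for every start index with an interleaved accumulator.
import Mathlib
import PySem

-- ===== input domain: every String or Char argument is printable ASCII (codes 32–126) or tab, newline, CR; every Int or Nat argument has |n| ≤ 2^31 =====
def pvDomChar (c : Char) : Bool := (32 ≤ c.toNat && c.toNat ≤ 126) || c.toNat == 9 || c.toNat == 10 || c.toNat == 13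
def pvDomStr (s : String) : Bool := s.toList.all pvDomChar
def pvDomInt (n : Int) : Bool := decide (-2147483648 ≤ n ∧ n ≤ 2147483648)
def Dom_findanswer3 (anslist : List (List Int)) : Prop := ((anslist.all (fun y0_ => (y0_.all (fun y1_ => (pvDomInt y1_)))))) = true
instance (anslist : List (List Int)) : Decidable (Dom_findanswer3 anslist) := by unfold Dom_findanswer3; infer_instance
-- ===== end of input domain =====

-- B transposes A's nested scans: one pass over the elements distributes each qualifying
-- difference into per-start-index buckets, a second pass emits running sums and repeated keys
-- (objective: alternative traversal/data structure, same cost).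

-- ===== PORT A =====
def findanswer3 (anslist : List (List Int)) : List Int × List Int :=
  ((PySem.List.pyRange 0 (PySem.List.len anslist) 1).foldl
    (fun (st : List Int × List Int) i =>
      -- copylist = anslist[:]
      let copylist := PySem.List.slice anslist none none
      let keynum := PySem.List.pyGetD (PySem.List.pyGetD copylist i []) 0 0
      ((PySem.List.pyRange i (PySem.List.len anslist) 1).foldl
        (fun (s : (List Int × List Int) × Int) j =>
          if PySem.List.pyGetD (PySem.List.pyGetD copylist j []) 1 0 < keynum then
            ((s.1.1 ++ [s.2 + keynum - PySem.List.pyGetD (PySem.List.pyGetD copylist j []) 1 0],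
              s.1.2 ++ [keynum]),
             s.2 + keynum - PySem.List.pyGetD (PySem.List.pyGetD copylist j []) 1 0)
          else s)
        (st, 0)).1)
    ([], []))

-- ===== PORT B =====
def findanswer3_alt (anslist : List (List Int)) : List Int × List Int :=
  let n : Int := PySem.List.len anslist
  let keys := anslist.map (fun row => PySem.List.pyGetD row 0 0)
  let vals := anslist.map (fun row => PySem.List.pyGetD row 1 0)
  let buckets0 := (PySem.List.pyRange 0 n 1).map (fun _ => ([] : List Int))
  let buckets := (PySem.List.pyRange 0 n 1).foldl
    (fun (bks : List (List Int)) j =>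
      let v := PySem.List.pyGetD vals j 0
      (PySem.List.pyRange 0 (j + 1) 1).foldl
        (fun (b : List (List Int)) i =>
          if v < PySem.List.pyGetD keys i 0 then
            -- buckets[i] = buckets[i] + [keys[i] - v]
            PySem.List.pySetD b i (PySem.List.pyGetD b i [] ++ [PySem.List.pyGetD keys i 0 - v])
          else b)
        bks)
    buckets0
  (PySem.List.pyRange 0 n 1).foldl
    (fun (st : List Int × List Int) i =>
      ((PySem.List.pyGetD buckets i []).foldl
        (fun (s : (List Int × List Int) × Int) d =>
          ((s.1.1 ++ [s.2 + d], s.1.2 ++ [PySem.List.pyGetD keys i 0]), s.2 + d))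
        (st, 0)).1)
    ([], [])

-- ===== PRECONDITION & SPEC =====
-- Pre_ excludes exactly the inputs where Python A raises IndexError: some row shorter than 2
-- (A reads row[0] and row[1] for every row).
def Pre_findanswer3 (anslist : List (List Int)) : Prop :=
  ∀ row ∈ anslist, 2 ≤ row.length
instance (anslist : List (List Int)) : Decidable (Pre_findanswer3 anslist) := by
  unfold Pre_findanswer3; infer_instance

def pvWitness_findanswer3 : List (List Int) := [[3, 1], [2, 0], [5, 4]]

def Spec_findanswer3 (anslist : List (List Int)) (out : List Int × List Int) : Prop := out = findanswer3_alt anslist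
instance (anslist : List (List Int)) (out : List Int × List Int) : Decidable (Spec_findanswer3 anslist out) := by unfold Spec_findanswer3; infer_instance

-- ===== CLAIM (what is proved, stated in full; the proofs are below) =====
def Claim_equal_findanswer3 : Prop := ∀ (anslist : List (List Int)), Dom_findanswer3 anslist → Pre_findanswer3 anslist → Spec_findanswer3 anslist (findanswer3 anslist)

-- ===== LEMMAS AND PROOFS =====

-- running prefix sums with initial offset m
def pvPref (m : Int) : List Int → List Int
  | [] => []
  | d :: ds => (m + d) :: pvPref (m + d) ds

-- the per-block filtered differences
def pvDiffs (keynum : Int) (s : List (List Int)) : List Int :=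
  (s.filter (fun r => decide (PySem.List.pyGetD r 1 0 < keynum))).map
    (fun r => keynum - PySem.List.pyGetD r 1 0)

-- common recursive description: process each suffix, append its block
def pvGo : List (List Int) → List Int × List Int → List Int × List Int
  | [], st => st
  | row :: rest, st =>
    pvGo rest
      (st.1 ++ pvPref 0 (pvDiffs (PySem.List.pyGetD row 0 0) (row :: rest)),
       st.2 ++ List.replicate (pvDiffs (PySem.List.pyGetD row 0 0) (row :: rest)).length
                 (PySem.List.pyGetD row 0 0))

lemma innerA_eq (keynum : Int) (s : List (List Int)) : ∀ (a k : List Int) (m : Int),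
    s.foldl (fun (st : (List Int × List Int) × Int) r =>
        if PySem.List.pyGetD r 1 0 < keynum then
          ((st.1.1 ++ [st.2 + keynum - PySem.List.pyGetD r 1 0], st.1.2 ++ [keynum]),
           st.2 + keynum - PySem.List.pyGetD r 1 0)
        else st) ((a, k), m)
    = ((a ++ pvPref m (pvDiffs keynum s),
        k ++ List.replicate (pvDiffs keynum s).length keynum),
       m + (pvDiffs keynum s).sum) := by
  induction s with
  | nil => intro a k m; simp [pvDiffs, pvPref]
  | cons r rest ih =>
    intro a k m
    by_cases h : PySem.List.pyGetD r 1 0 < keynum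
    · have hd : pvDiffs keynum (r :: rest)
          = (keynum - PySem.List.pyGetD r 1 0) :: pvDiffs keynum rest := by
        simp [pvDiffs, h]
      simp only [List.foldl_cons, if_pos h, hd, pvPref]
      rw [ih]
      simp [List.append_assoc, List.replicate_succ, add_sub_assoc, add_assoc]
    · have hd : pvDiffs keynum (r :: rest) = pvDiffs keynum rest := by
        simp [pvDiffs, h]
      simp only [List.foldl_cons, if_neg h, hd]
      exact ih a k m

lemma outerA_eq (full : List (List Int)) : ∀ (n i : Nat) (st : List Int × List Int),
    full.length - i = n →
    (PySem.List.pyRange (i : Int) (PySem.List.len full) 1).foldl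
      (fun (st : List Int × List Int) i =>
        ((PySem.List.pyRange i (PySem.List.len full) 1).foldl
          (fun (s : (List Int × List Int) × Int) j =>
            if PySem.List.pyGetD (PySem.List.pyGetD full j []) 1 0
                < PySem.List.pyGetD (PySem.List.pyGetD full i []) 0 0 then
              ((s.1.1 ++ [s.2 + PySem.List.pyGetD (PySem.List.pyGetD full i []) 0 0
                  - PySem.List.pyGetD (PySem.List.pyGetD full j []) 1 0],
                s.1.2 ++ [PySem.List.pyGetD (PySem.List.pyGetD full i []) 0 0]),
               s.2 + PySem.List.pyGetD (PySem.List.pyGetD full i []) 0 0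
                  - PySem.List.pyGetD (PySem.List.pyGetD full j []) 1 0)
            else s)
          (st, 0)).1)
      st
    = pvGo (full.drop i) st := by
  intro n
  induction n with
  | zero =>
    intro i st h
    have hle : full.length ≤ i := by omega
    rw [PySem.List.pyRange_one_eq_nil (by simp [PySem.List.len_eq]; exact_mod_cast hle)]
    rw [List.drop_eq_nil_of_le hle]
    rfl
  | succ n ih =>
    intro i st h
    obtain ⟨a, k⟩ := st
    have hlt : i < full.length := by omega
    have hlt' : (i : Int) < PySem.List.len full := by
      simp only [PySem.List.len_eq]; exact_mod_cast hlt
    rw [PySem.List.pyRange_one_cons hlt', List.foldl_cons]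
    rw [PySem.List.foldl_pyRange_pyGetD (xs := full) (d := [])
        (f := fun (s : (List Int × List Int) × Int) r =>
          if PySem.List.pyGetD r 1 0 < PySem.List.pyGetD (PySem.List.pyGetD full (i : Int) []) 0 0 then
            ((s.1.1 ++ [s.2 + PySem.List.pyGetD (PySem.List.pyGetD full (i : Int) []) 0 0 - PySem.List.pyGetD r 1 0],
              s.1.2 ++ [PySem.List.pyGetD (PySem.List.pyGetD full (i : Int) []) 0 0]),
             s.2 + PySem.List.pyGetD (PySem.List.pyGetD full (i : Int) []) 0 0 - PySem.List.pyGetD r 1 0)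
          else s) (init := ((a, k), 0)) (Int.natCast_nonneg i)]
    have hdrop : full.drop i = full[i] :: full.drop (i + 1) := List.drop_eq_getElem_cons hlt
    have hkey : PySem.List.pyGetD full (i : Int) [] = full[i] := by
      simp [List.getD_eq_getElem?_getD, List.getElem?_eq_getElem hlt]
    rw [Int.toNat_natCast, hdrop, hkey, innerA_eq]
    have hcast : ((i : Int) + 1) = ((i + 1 : Nat) : Int) := by push_cast; ring
    rw [hcast, ih (i + 1) _ (by omega)]
    rw [pvGo]

-- B-side helpers: getD-through-set, length preservation, per-index characterisation of the
-- bucket-filling fold, and the prefix-sum emission pass.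

lemma pvGetD_set (l : List (List Int)) (i m : Nat) (v : List Int) (h : m < l.length) :
    (l.set m v).getD i [] = if i = m then v else l.getD i [] := by
  simp only [List.getD_eq_getElem?_getD, List.getElem?_set]
  by_cases h1 : m = i
  · subst h1; simp [h]
  · rw [if_neg h1, if_neg (fun hh => h1 hh.symm)]

lemma pvGetD_map (f : List Int → Int) (full : List (List Int)) (m : Nat) (d : Int)
    (hm : m < full.length) : (full.map f).getD m d = f full[m] := by
  simp [List.getD_eq_getElem?_getD, List.getElem?_map, List.getElem?_eq_getElem hm]

lemma pvLenI (keys : List Int) (v : Int) (l : List Int) : ∀ (bks : List (List Int)),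
    (l.foldl (fun b i =>
        if v < PySem.List.pyGetD keys i 0 then
          PySem.List.pySetD b i (PySem.List.pyGetD b i [] ++ [PySem.List.pyGetD keys i 0 - v])
        else b) bks).length = bks.length := by
  induction l with
  | nil => intro bks; rfl
  | cons x xs ih =>
    intro bks
    simp only [List.foldl_cons]
    rw [ih]
    split_ifs with h
    · exact PySem.List.length_pySetD _ _ _
    · rfl

lemma pvInner_getD (keys : List Int) (v : Int) (bks : List (List Int)) : ∀ (m : Nat),
    m ≤ bks.length → ∀ i, i < bks.length →
    ((PySem.List.pyRange 0 (m : Int) 1).foldl (fun b i =>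
        if v < PySem.List.pyGetD keys i 0 then
          PySem.List.pySetD b i (PySem.List.pyGetD b i [] ++ [PySem.List.pyGetD keys i 0 - v])
        else b) bks).getD i []
    = if i < m ∧ v < keys.getD i 0 then bks.getD i [] ++ [keys.getD i 0 - v]
      else bks.getD i [] := by
  intro m
  induction m with
  | zero =>
    intro _ i _
    rw [PySem.List.pyRange_one_eq_nil (by norm_num)]
    simp
  | succ m ih =>
    intro hm i hi
    have hm' : m ≤ bks.length := by omega
    have hcast : ((m + 1 : Nat) : Int) = (m : Int) + 1 := by push_cast; ring
    rw [hcast, PySem.List.pyRange_one_succ_right (by positivity), List.foldl_append,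
        List.foldl_cons, List.foldl_nil]
    have hlen := pvLenI keys v (PySem.List.pyRange 0 (m : Int) 1) bks
    by_cases hv : v < keys.getD m 0
    · rw [if_pos (by simpa using hv)]
      simp only [PySem.List.pySetD_natCast, PySem.List.pyGetD_natCast]
      rw [pvGetD_set _ _ _ _ (by omega)]
      by_cases him : i = m
      · subst him
        rw [if_pos rfl, ih hm' i hi, if_neg (by omega), if_pos ⟨by omega, hv⟩]
      · rw [if_neg him, ih hm' i hi]
        exact if_congr ⟨fun ⟨a, b⟩ => ⟨by omega, b⟩, fun ⟨a, b⟩ => ⟨by omega, b⟩⟩ rfl rfl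
    · rw [if_neg (by simpa using hv), ih hm' i hi]
      exact if_congr
        ⟨fun ⟨a, b⟩ => ⟨by omega, b⟩,
         fun ⟨a, b⟩ => ⟨Nat.lt_of_le_of_ne (Nat.lt_succ_iff.mp a) (fun h => hv (h ▸ b)), b⟩⟩ rfl rfl

lemma pvDiffs_cons (keynum : Int) (r : List Int) (rest : List (List Int)) :
    pvDiffs keynum (r :: rest)
    = (if PySem.List.pyGetD r 1 0 < keynum then [keynum - PySem.List.pyGetD r 1 0] else [])
        ++ pvDiffs keynum rest := by
  by_cases h : PySem.List.pyGetD r 1 0 < keynum <;> simp [pvDiffs, h]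

lemma pvOuter_getD (full : List (List Int)) : ∀ (t m : Nat) (bks : List (List Int)),
    m + t = full.length → bks.length = full.length → ∀ i, i < full.length →
    ((PySem.List.pyRange (m : Int) (full.length : Int) 1).foldl (fun bks j =>
        (PySem.List.pyRange 0 (j + 1) 1).foldl (fun b i =>
          if PySem.List.pyGetD (full.map (fun row => PySem.List.pyGetD row 1 0)) j 0
              < PySem.List.pyGetD (full.map (fun row => PySem.List.pyGetD row 0 0)) i 0 then
            PySem.List.pySetD b i
              (PySem.List.pyGetD b i []
                ++ [PySem.List.pyGetD (full.map (fun row => PySem.List.pyGetD row 0 0)) i 0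
                     - PySem.List.pyGetD (full.map (fun row => PySem.List.pyGetD row 1 0)) j 0])
          else b) bks) bks).getD i []
    = bks.getD i []
        ++ pvDiffs ((full.map (fun row => PySem.List.pyGetD row 0 0)).getD i 0)
            (full.drop (max i m)) := by
  intro t
  induction t with
  | zero =>
    intro m bks hmt hlen i hi
    rw [PySem.List.pyRange_one_eq_nil (by exact_mod_cast (by omega : full.length ≤ m))]
    have hmax : max i m = m := by omega
    rw [hmax, List.foldl_nil, List.drop_eq_nil_of_le (by omega)]
    simp [pvDiffs]
  | succ t ih =>
    intro m bks hmt hlen i hi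
    have hm : m < full.length := by omega
    rw [PySem.List.pyRange_one_cons (by exact_mod_cast hm), List.foldl_cons]
    have hcast : ((m : Int) + 1) = ((m + 1 : Nat) : Int) := by push_cast; ring
    rw [hcast]
    set keys := full.map (fun row => PySem.List.pyGetD row 0 0) with hkeys
    set vals := full.map (fun row => PySem.List.pyGetD row 1 0) with hvals
    set v := PySem.List.pyGetD vals (m : Int) 0 with hv
    set bks' := (PySem.List.pyRange 0 ((m + 1 : Nat) : Int) 1).foldl (fun b i =>
      if v < PySem.List.pyGetD keys i 0 then
        PySem.List.pySetD b i (PySem.List.pyGetD b i [] ++ [PySem.List.pyGetD keys i 0 - v])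
      else b) bks with hbks'
    have hlen' : bks'.length = full.length := by rw [hbks', pvLenI, hlen]
    rw [ih (m + 1) bks' (by omega) hlen' i hi]
    have hvm : v = PySem.List.pyGetD full[m] 1 0 := by
      rw [hv, hvals, PySem.List.pyGetD_natCast, pvGetD_map _ _ _ _ hm]
    have hbg : bks'.getD i []
        = if i < m + 1 ∧ v < keys.getD i 0 then bks.getD i [] ++ [keys.getD i 0 - v]
          else bks.getD i [] := by
      rw [hbks']
      exact pvInner_getD keys v bks (m + 1) (by omega) i (by omega)
    rw [hbg]
    by_cases hle : i ≤ m
    · have h1 : max i m = m := by omega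
      have h2 : max i (m + 1) = m + 1 := by omega
      rw [h1, h2, List.drop_eq_getElem_cons hm, pvDiffs_cons, ← hvm]
      by_cases hc : v < keys.getD i 0
      · rw [if_pos ⟨by omega, hc⟩, if_pos hc, List.append_assoc]
      · rw [if_neg (fun h => hc h.2), if_neg hc, List.nil_append]
    · have h1 : max i m = i := by omega
      have h2 : max i (m + 1) = i := by omega
      rw [h1, h2, if_neg (fun h => hle (by omega))]

lemma pvInnerB2 (key : Int) : ∀ (b : List Int) (a k : List Int) (t : Int),
    b.foldl (fun (s : (List Int × List Int) × Int) d =>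
        ((s.1.1 ++ [s.2 + d], s.1.2 ++ [key]), s.2 + d)) ((a, k), t)
    = ((a ++ pvPref t b, k ++ List.replicate b.length key), t + b.sum) := by
  intro b
  induction b with
  | nil => intro a k t; simp [pvPref]
  | cons d ds ih =>
    intro a k t
    simp only [List.foldl_cons, pvPref]
    rw [ih]
    simp [List.replicate_succ, add_assoc]

lemma pvPhase2 (full buckets : List (List Int)) 
    (hb : ∀ i, i < full.length →
      buckets.getD i [] = pvDiffs (PySem.List.pyGetD full[i]! 0 0) (full.drop i)) :
    ∀ (t m : Nat) (st : List Int × List Int), m + t = full.length →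
    (PySem.List.pyRange (m : Int) (full.length : Int) 1).foldl (fun st i =>
        ((PySem.List.pyGetD buckets i []).foldl (fun (s : (List Int × List Int) × Int) d =>
          ((s.1.1 ++ [s.2 + d],
            s.1.2 ++ [PySem.List.pyGetD (full.map (fun row => PySem.List.pyGetD row 0 0)) i 0]),
           s.2 + d)) (st, 0)).1) st
    = pvGo (full.drop m) st := by
  intro t
  induction t with
  | zero =>
    intro m st hmt
    rw [PySem.List.pyRange_one_eq_nil (by exact_mod_cast (by omega : full.length ≤ m))]
    rw [List.foldl_nil, List.drop_eq_nil_of_le (by omega)]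
    rfl
  | succ t ih =>
    intro m st hmt
    obtain ⟨a, k⟩ := st
    have hm : m < full.length := by omega
    rw [PySem.List.pyRange_one_cons (by exact_mod_cast hm), List.foldl_cons]
    have hbm : PySem.List.pyGetD buckets (m : Int) []
        = pvDiffs (PySem.List.pyGetD full[m] 0 0) (full.drop m) := by
      rw [PySem.List.pyGetD_natCast]
      have := hb m hm
      rwa [getElem!_pos full m hm] at this
    have hkm : PySem.List.pyGetD (full.map (fun row => PySem.List.pyGetD row 0 0)) (m : Int) 0
        = PySem.List.pyGetD full[m] 0 0 := by
      rw [PySem.List.pyGetD_natCast, pvGetD_map _ _ _ _ hm]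
    rw [hbm, hkm, pvInnerB2]
    have hcast : ((m : Int) + 1) = ((m + 1 : Nat) : Int) := by push_cast; ring
    rw [hcast, ih (m + 1) _ (by omega)]
    have hdrop : full.drop m = full[m] :: full.drop (m + 1) := List.drop_eq_getElem_cons hm
    rw [hdrop, pvGo]

lemma pvBuckets0_getD (n : Int) (i : Nat) :
    ((PySem.List.pyRange 0 n 1).map (fun _ => ([] : List Int))).getD i [] = [] := by
  simp [List.getD_eq_getElem?_getD]

-- ===== VERDICT (by name: the statement is the Claim_ definition above) =====
theorem findanswer3_spec : Claim_equal_findanswer3 := by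
  intro anslist _ _
  unfold Spec_findanswer3
  have hA := outerA_eq anslist anslist.length 0 ([], []) (by omega)
  simp only [Nat.cast_zero, List.drop_zero] at hA
  unfold findanswer3
  simp only [PySem.List.slice_none_none]
  rw [hA]
  unfold findanswer3_alt
  simp only [PySem.List.len_eq]
  set keys := anslist.map (fun row => PySem.List.pyGetD row 0 0) with hkeys
  set vals := anslist.map (fun row => PySem.List.pyGetD row 1 0) with hvals
  set buckets0 := (PySem.List.pyRange 0 (anslist.length : Int) 1).map
    (fun _ => ([] : List Int)) with hb0
  set buckets := (PySem.List.pyRange 0 (anslist.length : Int) 1).foldl (fun bks j =>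
      (PySem.List.pyRange 0 (j + 1) 1).foldl (fun b i =>
        if PySem.List.pyGetD vals j 0 < PySem.List.pyGetD keys i 0 then
          PySem.List.pySetD b i
            (PySem.List.pyGetD b i [] ++ [PySem.List.pyGetD keys i 0 - PySem.List.pyGetD vals j 0])
        else b) bks) buckets0 with hbk
  have hlen0 : buckets0.length = anslist.length := by
    simp [hb0, PySem.List.length_pyRange_one]
  have hbchar : ∀ i, i < anslist.length →
      buckets.getD i [] = pvDiffs (PySem.List.pyGetD anslist[i]! 0 0) (anslist.drop i) := by
    intro i hi
    have h00 : buckets0.getD i ([] : List Int) = [] := by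
      rw [hb0]; exact pvBuckets0_getD _ _
    have hthis := pvOuter_getD anslist anslist.length 0 buckets0 (by omega) hlen0 i hi
    simp only [Nat.cast_zero, Nat.max_zero] at hthis
    rw [← hkeys, ← hvals, ← hbk, h00, List.nil_append] at hthis
    rw [hthis]
    congr 1
    rw [hkeys, pvGetD_map _ _ _ _ hi, getElem!_pos anslist i hi]
  have h2 := pvPhase2 anslist buckets hbchar anslist.length 0 ([], []) (by omega)
  simp only [Nat.cast_zero, List.drop_zero] at h2
  rw [← hkeys] at h2
  exact h2.symm
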